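-- pv_equiv track=rewrite | github.com/vllm-project/vllm | vllm/worker/draft_target_worker.py | _get_token_ids_to_score
-- ===== SOURCE A (Python) =====
-- from typing import Iterator, List, Tuple, Optional, Union
--
-- TokenId = int
--
-- def _get_token_ids_to_score(
--
--         full_spec_token_ids: List[int]  # shape: [k]
-- ) -> List[List[TokenId]]:
--     """Given an int tensor of proposal token ids, return a list of
--     token ids that should be scored.
--
--     Returns k+1 output lists. The additional one is used for generating the
--     bonus token.
--
--     Example:
--         Input: [0, 1, 2, 3] (k=4)
--         Output: (k+1 lists)
--             []
--             [0]
--             [0, 1]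
--             [0, 1, 2]
--             [0, 1, 2, 3]
--     """
--     empty_token_ids = []
--
--     token_ids_to_score = [empty_token_ids]
--     token_ids_to_score.extend([
--         full_spec_token_ids[:i + 1]
--         for i in range(len(full_spec_token_ids))
--     ])
--     return token_ids_to_score
-- ===== SOURCE B (Python) =====
-- from typing import List
--
-- TokenId = int
--
-- def _get_token_ids_to_score(
--         full_spec_token_ids: List[int]  # shape: [k]
-- ) -> List[List[TokenId]]:
--     token_ids_to_score = [[]]
--     acc = []
--     for tok in full_spec_token_ids:
--         acc = acc + [tok]
--         token_ids_to_score.append(acc)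
--     return token_ids_to_score
-- ===== Notes on version B (the rewrite author's own statement) =====
-- stated objective: alternative
-- what changed: Replaces the per-index slicing comprehension with a single accumulator pass that extends a running prefix and appends a fresh copy each step, never slicing or indexing the source.
import Mathlib
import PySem

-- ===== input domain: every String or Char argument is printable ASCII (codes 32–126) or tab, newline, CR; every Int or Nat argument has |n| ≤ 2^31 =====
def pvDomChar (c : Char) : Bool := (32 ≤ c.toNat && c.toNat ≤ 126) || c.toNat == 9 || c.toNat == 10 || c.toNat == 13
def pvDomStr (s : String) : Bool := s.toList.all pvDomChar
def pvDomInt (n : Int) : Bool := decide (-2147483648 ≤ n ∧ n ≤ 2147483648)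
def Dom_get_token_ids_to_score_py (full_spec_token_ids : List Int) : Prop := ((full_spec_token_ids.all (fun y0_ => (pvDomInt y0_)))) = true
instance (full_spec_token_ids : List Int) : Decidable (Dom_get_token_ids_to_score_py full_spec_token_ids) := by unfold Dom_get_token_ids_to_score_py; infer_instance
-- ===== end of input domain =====

-- B builds the k+1 prefixes with one running accumulator pass instead of slicing per index (alternative decomposition).

-- ===== PORT A =====
def get_token_ids_to_score_py (full_spec_token_ids : List Int) : List (List Int) :=
  let empty_token_ids : List Int := []
  let token_ids_to_score := [empty_token_ids]
  token_ids_to_score ++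
    (List.range full_spec_token_ids.length).map
      (fun (i : Nat) => PySem.List.slice full_spec_token_ids none (some ((i : Int) + 1)))

-- ===== PORT B =====
def get_token_ids_to_score_py_alt (full_spec_token_ids : List Int) : List (List Int) :=
  (full_spec_token_ids.foldl
    (fun (st : List Int × List (List Int)) tok =>
      let acc := st.1 ++ [tok]
      (acc, st.2 ++ [acc]))
    (([] : List Int), [([] : List Int)])).2

-- ===== PRECONDITION & SPEC =====
def Spec_get_token_ids_to_score_py (full_spec_token_ids : List Int) (out : List (List Int)) : Prop := out = get_token_ids_to_score_py_alt full_spec_token_ids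
instance (full_spec_token_ids : List Int) (out : List (List Int)) : Decidable (Spec_get_token_ids_to_score_py full_spec_token_ids out) := by unfold Spec_get_token_ids_to_score_py; infer_instance

-- ===== CLAIM (what is proved, stated in full; the proofs are below) =====
def Claim_equal_get_token_ids_to_score_py : Prop := ∀ (full_spec_token_ids : List Int), Dom_get_token_ids_to_score_py full_spec_token_ids → Spec_get_token_ids_to_score_py full_spec_token_ids (get_token_ids_to_score_py full_spec_token_ids)

-- ===== LEMMAS AND PROOFS =====

-- B's fold, from an arbitrary state, appends the prefixes acc ++ xs.take (i+1).
theorem altFold_eq (xs acc : List Int) (res : List (List Int)) :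
    (xs.foldl
      (fun (st : List Int × List (List Int)) tok =>
        let acc := st.1 ++ [tok]
        (acc, st.2 ++ [acc]))
      (acc, res)).2
    = res ++ (List.range xs.length).map (fun i => acc ++ xs.take (i + 1)) := by
  induction xs generalizing acc res with
  | nil => simp
  | cons x xs ih =>
    simp only [List.foldl_cons, List.length_cons, List.range_succ_eq_map, List.map_cons,
      List.map_map]
    rw [ih]
    simp [List.append_assoc, Function.comp]

-- ===== VERDICT (by name: the statement is the Claim_ definition above) =====
theorem get_token_ids_to_score_py_spec : Claim_equal_get_token_ids_to_score_py := by
  intro xs _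
  show get_token_ids_to_score_py xs = get_token_ids_to_score_py_alt xs
  unfold get_token_ids_to_score_py get_token_ids_to_score_py_alt
  rw [altFold_eq]
  simp only [List.nil_append]
  congr 1
  apply List.map_congr_left
  intro i hi
  have : PySem.List.slice xs none (some ((i : Int) + 1)) = xs.take (i + 1) := by
    have := PySem.List.slice_to_natCast xs (i + 1)
    simpa using this
  simpa using this
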